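-- pv_equiv track=rewrite | github.com/iamjohnford/dex | app/api/pokemon.py | merge_dict_lists
-- ===== SOURCE A (Python) =====
-- def merge_dict_lists(key, l1, l2, append=True):
--     merged = {}
--
--     for item in l1:
--         if item[key] in merged:
--             merged[item[key]].update(item)
--         else:
--             merged[item[key]] = item
--
--     for item in l1 + l2:
--         if item[key] in merged:
--             merged[item[key]].update(item)
--         elif append:
--             merged[item[key]] = item
--     return [val for (_, val) in merged.items()]
-- ===== SOURCE B (Python) =====
-- def _merge_key(key, k, items):
--     d = {}
--     for item in items:
--         if item[key] == k:
--             d.update(item)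
--     return d
--
--
-- def merge_dict_lists(key, l1, l2, append=True):
--     # Group-by decomposition: first compute the ordered list of result keys
--     # (first occurrences over l1, plus l2's new keys when append), then build
--     # each output dict independently by merging every item bearing that key.
--     # (Unlike A, this does not mutate the input dicts in place.)
--     items = l1 + l2
--     admitted = items if append else l1
--     order = list(dict.fromkeys(item[key] for item in admitted))
--     return [_merge_key(key, k, items) for k in order]
-- ===== Notes on version B (the rewrite author's own statement) =====
-- stated objective: alternative
-- what changed: A merges incrementally into one dict-of-dicts accumulator over two passes (l1, then l1+l2 again); B is a group-by: it first computes the ordered list of result keys (first occurrences over l1, plus l2's new keys when append) and then builds each output dict independently by merging every item of l1+l2 bearing that key.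
import Mathlib
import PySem

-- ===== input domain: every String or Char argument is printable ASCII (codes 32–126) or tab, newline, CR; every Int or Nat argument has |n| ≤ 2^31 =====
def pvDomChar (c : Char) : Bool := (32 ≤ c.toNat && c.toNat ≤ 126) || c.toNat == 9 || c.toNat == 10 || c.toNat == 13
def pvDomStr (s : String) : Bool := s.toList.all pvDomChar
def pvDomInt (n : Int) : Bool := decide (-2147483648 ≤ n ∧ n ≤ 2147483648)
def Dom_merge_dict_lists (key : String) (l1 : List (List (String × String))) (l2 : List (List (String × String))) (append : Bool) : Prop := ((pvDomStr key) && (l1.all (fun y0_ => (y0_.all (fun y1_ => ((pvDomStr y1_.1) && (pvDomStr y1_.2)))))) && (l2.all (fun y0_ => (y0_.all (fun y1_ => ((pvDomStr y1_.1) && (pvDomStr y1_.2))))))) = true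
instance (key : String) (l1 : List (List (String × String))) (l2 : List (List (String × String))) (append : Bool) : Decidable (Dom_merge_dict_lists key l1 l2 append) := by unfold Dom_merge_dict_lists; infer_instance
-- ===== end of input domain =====

-- B replaces A's incremental dict-of-dicts merging (two passes mutating one accumulator) by a
-- group-by decomposition: first the ordered list of result keys, then each output dict built
-- independently by merging every item bearing that key; equivalence is about the RETURN value
-- only (A mutates the input dicts in place via .update, B builds fresh dicts and does not).

-- ===== PORT A =====
-- Python `merged[item[key]].update(item)` mutates the stored dict in place (position kept);
-- ported as a positional-overwrite Dict.insert of the updated value — exact.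
def merge_dict_lists (key : String) (l1 : List (List (String × String))) (l2 : List (List (String × String))) (append : Bool) : List (List (String × String)) :=
  let merged : PySem.Dict String (PySem.Dict String String) := PySem.Dict.empty
  let merged := l1.foldl (fun merged item =>
      let k := (PySem.Dict.ofList item).getD key ""
      if merged.contains k then
        merged.insert k ((merged.getD k PySem.Dict.empty).update item)
      else
        merged.insert k (PySem.Dict.ofList item)) merged
  let merged := (l1 ++ l2).foldl (fun merged item =>
      let k := (PySem.Dict.ofList item).getD key ""
      if merged.contains k then
        merged.insert k ((merged.getD k PySem.Dict.empty).update item)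
      else if append then
        merged.insert k (PySem.Dict.ofList item)
      else merged) merged
  merged.values.map PySem.Dict.items

-- ===== PORT B =====
-- Python `_merge_key`: a fresh dict, updated in place by every item whose key field is k;
-- `d.update(item)` ported as PySem.Dict.update — exact.
def pvMergeKey (key : String) (k : String) (items : List (List (String × String))) : List (String × String) :=
  (items.foldl (fun d item =>
      if (PySem.Dict.ofList item).getD key "" = k then d.update item else d)
    (PySem.Dict.empty : PySem.Dict String String)).items

-- Python `list(dict.fromkeys(...))` is PySem.List.dedup (first occurrences, in order).
def merge_dict_lists_alt (key : String) (l1 : List (List (String × String))) (l2 : List (List (String × String))) (append : Bool) : List (List (String × String)) :=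
  let items := l1 ++ l2
  let admitted := if append then items else l1
  let order := PySem.List.dedup (admitted.map (fun item => (PySem.Dict.ofList item).getD key ""))
  order.map (fun k => pvMergeKey key k items)

-- ===== PRECONDITION & SPEC =====
-- Pre_ excludes exactly the inputs on which Python A raises KeyError: some item without the key field.
def Pre_merge_dict_lists (key : String) (l1 : List (List (String × String))) (l2 : List (List (String × String))) (append : Bool) : Prop :=
  ∀ item ∈ l1 ++ l2, key ∈ item.map Prod.fst
instance (key : String) (l1 : List (List (String × String))) (l2 : List (List (String × String))) (append : Bool) : Decidable (Pre_merge_dict_lists key l1 l2 append) := by unfold Pre_merge_dict_lists; infer_instance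
def pvWitness_merge_dict_lists : String × (List (List (String × String))) × (List (List (String × String))) × Bool :=
  ("id", [[("id", "1"), ("x", "a")], [("id", "2")]], [[("id", "1"), ("y", "b")], [("id", "3")]], true)

def Spec_merge_dict_lists (key : String) (l1 : List (List (String × String))) (l2 : List (List (String × String))) (append : Bool) (out : List (List (String × String))) : Prop := out = merge_dict_lists_alt key l1 l2 append
instance (key : String) (l1 : List (List (String × String))) (l2 : List (List (String × String))) (append : Bool) (out : List (List (String × String))) : Decidable (Spec_merge_dict_lists key l1 l2 append out) := by unfold Spec_merge_dict_lists; infer_instance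

-- ===== CLAIM (what is proved, stated in full; the proofs are below) =====
def Claim_equal_merge_dict_lists : Prop := ∀ (key : String) (l1 : List (List (String × String))) (l2 : List (List (String × String))) (append : Bool), Dom_merge_dict_lists key l1 l2 append → Pre_merge_dict_lists key l1 l2 append → Spec_merge_dict_lists key l1 l2 append (merge_dict_lists key l1 l2 append)

-- ===== LEMMAS AND PROOFS =====

-- The key field of an item, as both programs compute it.
def pvKeyOf (key : String) (item : List (String × String)) : String :=
  (PySem.Dict.ofList item).getD key ""

-- Generic "group-by step": insert under κf x the combination of the current entry with x.
def pvGStep {ν β : Type} (κf : β → String) (comb : ν → β → ν) (dflt : ν)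
    (m : PySem.Dict String ν) (x : β) : PySem.Dict String ν :=
  m.insert (κf x) (comb (m.getD (κf x) dflt) x)

lemma pvGFold_contains_mono {ν β : Type} (κf : β → String) (comb : ν → β → ν) (dflt : ν)
    (xs : List β) (m : PySem.Dict String ν) (s : String) (h : m.contains s = true) :
    (xs.foldl (pvGStep κf comb dflt) m).contains s = true := by
  induction xs generalizing m with
  | nil => exact h
  | cons x t ih =>
    apply ih
    simp [pvGStep, PySem.Dict.contains_insert, h]

lemma pvGFold_contains_of_mem {ν β : Type} (κf : β → String) (comb : ν → β → ν) (dflt : ν)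
    (xs : List β) : ∀ (m : PySem.Dict String ν) {x : β}, x ∈ xs →
    (xs.foldl (pvGStep κf comb dflt) m).contains (κf x) = true := by
  induction xs with
  | nil => intro m x hx; cases hx
  | cons y t ih =>
    intro m x hx
    rw [List.foldl_cons]
    rcases List.mem_cons.mp hx with h | h
    · subst h
      apply pvGFold_contains_mono
      show (m.insert (κf x) (comb (m.getD (κf x) dflt) x)).contains (κf x) = true
      rw [PySem.Dict.contains_insert]
      simp
    · exact ih _ h

lemma pvGFold_keys_of_contains {ν β : Type} (κf : β → String) (comb : ν → β → ν) (dflt : ν)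
    (xs : List β) (m : PySem.Dict String ν) (h : ∀ x ∈ xs, m.contains (κf x) = true) :
    (xs.foldl (pvGStep κf comb dflt) m).keys = m.keys := by
  induction xs generalizing m with
  | nil => rfl
  | cons x t ih =>
    have hx := h x (by simp)
    have hkeys : (pvGStep κf comb dflt m x).keys = m.keys :=
      PySem.Dict.keys_insert_of_contains m _ hx
    rw [List.foldl_cons, ih]
    · exact hkeys
    · intro y hy
      simp [pvGStep, PySem.Dict.contains_insert, h y (by simp [hy])]

-- Lookup characterisation of a group-by fold.
lemma pvGFold_get? {ν β : Type} [DecidableEq β] (κf : β → String) (comb : ν → β → ν) (dflt : ν)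
    (xs : List β) (m : PySem.Dict String ν) (s : String) :
    (xs.foldl (pvGStep κf comb dflt) m).get? s =
      (if xs.filter (fun x => κf x = s) = [] then m.get? s
       else some ((xs.filter (fun x => κf x = s)).foldl comb (m.getD s dflt))) := by
  induction xs generalizing m with
  | nil => simp
  | cons x t ih =>
    rw [List.foldl_cons, ih]
    by_cases hk : κf x = s
    · have hf : (x :: t).filter (fun x => κf x = s) = x :: t.filter (fun x => κf x = s) := by
        simp [hk]
      have hget : (pvGStep κf comb dflt m x).get? s = some (comb (m.getD s dflt) x) := by
        simp [pvGStep, hk]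
      have hgetD : (pvGStep κf comb dflt m x).getD s dflt = comb (m.getD s dflt) x := by
        simp [pvGStep, hk]
      rw [hf]
      rw [if_neg (show ¬(x :: t.filter (fun x => κf x = s) = []) from List.cons_ne_nil _ _)]
      by_cases h1 : t.filter (fun x => κf x = s) = []
      · rw [if_pos h1, h1, hget]
        simp
      · rw [if_neg h1, hgetD]
        simp
    · have hf : (x :: t).filter (fun x => κf x = s) = t.filter (fun x => κf x = s) := by
        simp [hk]
      have hget : (pvGStep κf comb dflt m x).get? s = m.get? s := by
        show (m.insert (κf x) (comb (m.getD (κf x) dflt) x)).get? s = m.get? s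
        rw [PySem.Dict.get?_insert, if_neg (fun h => hk h.symm)]
      have hgetD : (pvGStep κf comb dflt m x).getD s dflt = m.getD s dflt := by
        show (m.insert (κf x) (comb (m.getD (κf x) dflt) x)).getD s dflt = m.getD s dflt
        rw [PySem.Dict.getD_insert, if_neg (fun h => hk h.symm)]
      rw [hf, hget, hgetD]

-- A fold that only keeps the last value does not depend on its start.
lemma pvFoldl_snd_indep {β ν : Type} (F : List β) (f : β → ν) (hne : F ≠ []) (a b : ν) :
    F.foldl (fun _ p => f p) a = F.foldl (fun _ p => f p) b := by
  cases F with
  | nil => exact absurd rfl hne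
  | cons x t => rfl

-- Extensionality for association lists with distinct keys.
lemma pvItems_ext {ν : Type} (l₁ l₂ : List (String × ν))
    (hn : (l₁.map Prod.fst).Nodup) (hk : l₁.map Prod.fst = l₂.map Prod.fst)
    (hg : ∀ s, (PySem.Dict.mk l₁).get? s = (PySem.Dict.mk l₂).get? s) : l₁ = l₂ := by
  induction l₁ generalizing l₂ with
  | nil =>
    cases l₂ with
    | nil => rfl
    | cons p t => simp at hk
  | cons p t ih =>
    cases l₂ with
    | nil => simp at hk
    | cons q t₂ =>
      simp only [List.map_cons, List.cons.injEq] at hk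
      obtain ⟨hpq, htk⟩ := hk
      have hv : p.2 = q.2 := by
        have := hg p.1
        rw [show (PySem.Dict.mk (p :: t)) = PySem.Dict.mk ((p.1, p.2) :: t) by rfl,
            show (PySem.Dict.mk (q :: t₂)) = PySem.Dict.mk ((q.1, q.2) :: t₂) by rfl,
            PySem.Dict.get?_mk_cons, PySem.Dict.get?_mk_cons] at this
        simpa [hpq] using this
      have hcons := List.nodup_cons.mp (show (p.1 :: t.map Prod.fst).Nodup by simpa using hn)
      have hnt : (t.map Prod.fst).Nodup := hcons.2
      have hpn : p.1 ∉ t.map Prod.fst := hcons.1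
      have hqn : q.1 ∉ t₂.map Prod.fst := by rw [← hpq, ← htk]; exact hpn
      have htail : t = t₂ := by
        refine ih t₂ hnt htk ?_
        intro s
        by_cases hs : s = p.1
        · have h1 : (PySem.Dict.mk t).get? s = none := by
            rw [PySem.Dict.get?_eq_none_iff_not_mem_keys, PySem.Dict.keys_mk, hs]
            exact hpn
          have h2 : (PySem.Dict.mk t₂).get? s = none := by
            rw [PySem.Dict.get?_eq_none_iff_not_mem_keys, PySem.Dict.keys_mk, hs, hpq]
            exact hqn
          rw [h1, h2]
        · have := hg s
          rw [show (PySem.Dict.mk (p :: t)) = PySem.Dict.mk ((p.1, p.2) :: t) by rfl,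
              show (PySem.Dict.mk (q :: t₂)) = PySem.Dict.mk ((q.1, q.2) :: t₂) by rfl,
              PySem.Dict.get?_mk_cons, PySem.Dict.get?_mk_cons] at this
          have h1 : (p.1 == s) = false := by simpa using fun h => hs h.symm
          have h2 : (q.1 == s) = false := by rw [← hpq]; exact h1
          rw [h1, h2] at this
          simpa using this
      have : p = q := Prod.ext hpq hv
      rw [this, htail]

lemma pvDict_ext {ν : Type} (d₁ d₂ : PySem.Dict String ν)
    (hn : d₁.keys.Nodup) (hk : d₁.keys = d₂.keys)
    (hg : ∀ s, d₁.get? s = d₂.get? s) : d₁ = d₂ := by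
  obtain ⟨l₁⟩ := d₁
  obtain ⟨l₂⟩ := d₂
  congr 1
  exact pvItems_ext l₁ l₂ (by simpa [PySem.Dict.keys_mk] using hn)
    (by simpa [PySem.Dict.keys_mk] using hk) hg

-- Replaying the same pair list over its own result is a no-op.
lemma pvInner_replay {ν : Type} [Inhabited ν] [DecidableEq ν] (d : PySem.Dict String ν)
    (hd : d.keys.Nodup) (ps : List (String × ν)) (dflt : ν) :
    ps.foldl (pvGStep Prod.fst (fun _ p => p.2) dflt) (ps.foldl (pvGStep Prod.fst (fun _ p => p.2) dflt) d)
      = ps.foldl (pvGStep Prod.fst (fun _ p => p.2) dflt) d := by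
  set D := ps.foldl (pvGStep Prod.fst (fun _ p => p.2) dflt) d with hD
  have hDn : D.keys.Nodup := by
    rw [hD]
    exact PySem.Dict.nodup_keys_foldl_insert_key ps Prod.fst
      (fun m p => (fun _ p => p.2) (m.getD p.1 dflt) p) d hd
  have hDDn : (ps.foldl (pvGStep Prod.fst (fun _ p => p.2) dflt) D).keys.Nodup :=
    PySem.Dict.nodup_keys_foldl_insert_key ps Prod.fst _ D hDn
  apply pvDict_ext _ _ hDDn
  · apply pvGFold_keys_of_contains
    intro p hp
    rw [hD]
    exact pvGFold_contains_of_mem _ _ _ _ _ hp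
  · intro s
    by_cases hf : ps.filter (fun p => p.1 = s) = []
    · rw [pvGFold_get?, if_pos hf]
    · rw [pvGFold_get?, if_neg hf]
      rw [hD, pvGFold_get?, if_neg hf]
      congr 1
      exact pvFoldl_snd_indep _ _ hf _ _

-- The merge step shared by A's branches: merge item into the entry for its key field.
def pvOStep (key : String) (m : PySem.Dict String (PySem.Dict String String))
    (item : List (String × String)) : PySem.Dict String (PySem.Dict String String) :=
  pvGStep (pvKeyOf key) (fun d it => d.update it) PySem.Dict.empty m item

lemma pvOStep_eq (key : String) :
    pvOStep key = pvGStep (pvKeyOf key) (fun d it => d.update it) PySem.Dict.empty := rfl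

-- Replaying l1 over its own merged result is a no-op.
lemma pvOuter_replay (key : String) (l1 : List (List (String × String))) :
    l1.foldl (pvOStep key) (l1.foldl (pvOStep key) PySem.Dict.empty)
      = l1.foldl (pvOStep key) PySem.Dict.empty := by
  set M := l1.foldl (pvOStep key) PySem.Dict.empty with hM
  have hMn : M.keys.Nodup := by
    rw [hM]
    exact PySem.Dict.nodup_keys_foldl_insert_key l1 (pvKeyOf key)
      (fun m it => (m.getD (pvKeyOf key it) PySem.Dict.empty).update it) PySem.Dict.empty
      PySem.Dict.nodup_keys_empty
  have hMMn : (l1.foldl (pvOStep key) M).keys.Nodup :=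
    PySem.Dict.nodup_keys_foldl_insert_key l1 (pvKeyOf key) _ M hMn
  apply pvDict_ext _ _ hMMn
  · apply pvGFold_keys_of_contains
    intro it hit
    rw [hM]
    exact pvGFold_contains_of_mem _ _ _ _ _ hit
  · intro s
    have hempty' : (PySem.Dict.empty : PySem.Dict String (PySem.Dict String String)).getD s PySem.Dict.empty = PySem.Dict.empty := by
      simp [PySem.Dict.getD_eq_get?_getD, PySem.Dict.get?_empty]
    by_cases hf : l1.filter (fun it => pvKeyOf key it = s) = []
    · rw [pvOStep_eq, pvGFold_get?, if_pos hf]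
    · have hMg : M.get? s
          = some ((l1.filter (fun it => pvKeyOf key it = s)).foldl (fun d it => d.update it)
              (PySem.Dict.empty.getD s PySem.Dict.empty)) := by
        rw [hM, pvOStep_eq, pvGFold_get?, if_neg hf]
      have hMgetD : M.getD s PySem.Dict.empty
          = (l1.filter (fun it => pvKeyOf key it = s)).foldl (fun d it => d.update it)
              PySem.Dict.empty := by
        rw [PySem.Dict.getD_eq_get?_getD, hMg, hempty']
        rfl
      rw [pvOStep_eq, pvGFold_get?, if_neg hf, hMg, hMgetD, hempty']
      congr 1
      have hflat : ∀ (d : PySem.Dict String String),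
          (l1.filter (fun it => pvKeyOf key it = s)).foldl (fun d it => d.update it) d
            = (l1.filter (fun it => pvKeyOf key it = s)).flatten.foldl
                (pvGStep Prod.fst (fun _ p => p.2) "") d := by
        intro d
        rw [List.foldl_flatten]
        rfl
      rw [hflat, hflat]
      exact pvInner_replay PySem.Dict.empty PySem.Dict.nodup_keys_empty _ ""

-- Named transliterations of A's two loop bodies.
def pvStepA (key : String) (m : PySem.Dict String (PySem.Dict String String))
    (item : List (String × String)) : PySem.Dict String (PySem.Dict String String) :=
  if m.contains (pvKeyOf key item) then
    m.insert (pvKeyOf key item) ((m.getD (pvKeyOf key item) PySem.Dict.empty).update item)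
  else m.insert (pvKeyOf key item) (PySem.Dict.ofList item)

def pvStepA2 (key : String) (append : Bool) (m : PySem.Dict String (PySem.Dict String String))
    (item : List (String × String)) : PySem.Dict String (PySem.Dict String String) :=
  if m.contains (pvKeyOf key item) then
    m.insert (pvKeyOf key item) ((m.getD (pvKeyOf key item) PySem.Dict.empty).update item)
  else if append then m.insert (pvKeyOf key item) (PySem.Dict.ofList item)
  else m

-- A's first-pass body equals the shared merge step (pointwise).
lemma pvStepA_eq (key : String) (m : PySem.Dict String (PySem.Dict String String))
    (item : List (String × String)) : pvStepA key m item = pvOStep key m item := by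
  unfold pvStepA
  by_cases hc : m.contains (pvKeyOf key item) = true
  · rw [if_pos hc]; rfl
  · rw [if_neg hc]
    unfold pvOStep pvGStep
    rw [PySem.Dict.getD_of_not_contains m PySem.Dict.empty (by simpa using hc)]
    rfl

-- With append = True, A's second-pass body is its first-pass body.
lemma pvStepA2_true_eq (key : String) (m : PySem.Dict String (PySem.Dict String String))
    (item : List (String × String)) : pvStepA2 key true m item = pvStepA key m item := by
  unfold pvStepA2 pvStepA
  split <;> rfl

-- With append = False, A's second pass is the merge step over the admitted items only.
lemma pvFold_stepA2_false (key : String) (l1k : PySem.Set String)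
    (xs : List (List (String × String))) :
    ∀ (m : PySem.Dict String (PySem.Dict String String)),
    (∀ s, m.contains s = l1k.contains s) →
    xs.foldl (pvStepA2 key false) m
      = (xs.filter (fun it => l1k.contains (pvKeyOf key it))).foldl (pvOStep key) m := by
  induction xs with
  | nil => intro m _; rfl
  | cons x t ih =>
    intro m hinv
    rw [List.foldl_cons]
    by_cases hc : l1k.contains (pvKeyOf key x) = true
    · have hc' : pvKeyOf key x ∈ l1k := (PySem.Set.contains_iff _ _).mp hc
      have hmc : m.contains (pvKeyOf key x) = true := by rw [hinv]; exact hc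
      have hstep : pvStepA2 key false m x = pvOStep key m x := by
        unfold pvStepA2; rw [if_pos hmc]; rfl
      have hfil : (x :: t).filter (fun it => l1k.contains (pvKeyOf key it))
          = x :: t.filter (fun it => l1k.contains (pvKeyOf key it)) := by
        simp [hc']
      rw [hstep, hfil, List.foldl_cons]
      apply ih
      intro s
      unfold pvOStep pvGStep
      rw [PySem.Dict.contains_insert, hinv s]
      by_cases hs : s = pvKeyOf key x
      · subst hs; simp [hc']
      · simp [hs]
    · have hc' : pvKeyOf key x ∉ l1k := fun hmem =>
        hc ((PySem.Set.contains_iff _ _).mpr hmem)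
      have hmc : m.contains (pvKeyOf key x) = false := by
        rw [hinv]; simpa using hc
      have hstep : pvStepA2 key false m x = m := by
        unfold pvStepA2; rw [if_neg (by simp [hmc])]; simp
      have hfil : (x :: t).filter (fun it => l1k.contains (pvKeyOf key it))
          = t.filter (fun it => l1k.contains (pvKeyOf key it)) := by
        simp [hc']
      rw [hstep, hfil]
      exact ih m hinv
  
-- Keys of a merge fold are the key set of the processed items, in first-occurrence order.
lemma pvKeys_fold (key : String) (xs : List (List (String × String))) :
    (xs.foldl (pvOStep key) PySem.Dict.empty).keys
      = PySem.Set.ofList (xs.map (pvKeyOf key)) := by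
  have h := PySem.Dict.keys_foldl_insert_key xs (pvKeyOf key)
    (fun m it => (m.getD (pvKeyOf key it) PySem.Dict.empty).update it)
    (PySem.Dict.empty : PySem.Dict String (PySem.Dict String String))
  exact h

-- set(xs ++ ys) = set(xs) when every element of ys already occurs in xs.
lemma pvOfList_append_absorb (xs ys : List String) (h : ∀ y ∈ ys, y ∈ xs) :
    PySem.Set.ofList (xs ++ ys) = PySem.Set.ofList xs := by
  rw [PySem.Set.ofList_append, PySem.Set.update_eq_append_filter]
  have hnil : (PySem.Set.ofList ys).filter
      (fun y => !(PySem.Set.contains (PySem.Set.ofList xs) y)) = [] := by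
    apply List.filter_eq_nil_iff.mpr
    intro y hy
    have hyx : y ∈ xs := h y ((PySem.Set.mem_ofList ys y).mp hy)
    have hcx : PySem.Set.contains (PySem.Set.ofList xs) y = true :=
      (PySem.Set.contains_iff _ _).mpr ((PySem.Set.mem_ofList xs y).mpr hyx)
    simp [hyx]
  rw [hnil, List.append_nil]

-- The per-key value of a merge fold from empty: merge of the items bearing that key.
lemma pvGetD_fold (key : String) (xs : List (List (String × String))) (k : String)
    (hne : xs.filter (fun it => pvKeyOf key it = k) ≠ []) :
    (xs.foldl (pvOStep key) PySem.Dict.empty).getD k PySem.Dict.empty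
      = (xs.filter (fun it => pvKeyOf key it = k)).foldl (fun d it => d.update it)
          PySem.Dict.empty := by
  have hg := pvGFold_get? (pvKeyOf key) (fun d it => d.update it) PySem.Dict.empty xs
    (PySem.Dict.empty) k
  rw [if_neg hne] at hg
  rw [pvOStep_eq, PySem.Dict.getD_eq_get?_getD, hg]
  simp [PySem.Dict.getD_eq_get?_getD, PySem.Dict.get?_empty]

-- B's inner loop is the merge of the items bearing key k.
lemma pvMergeKey_eq (key k : String) (items : List (List (String × String))) :
    pvMergeKey key k items
      = ((items.filter (fun it => pvKeyOf key it = k)).foldl (fun d it => d.update it)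
          (PySem.Dict.empty : PySem.Dict String String)).items := by
  unfold pvMergeKey pvKeyOf
  rw [List.foldl_filter]
  simp only [decide_eq_true_eq]

-- Common finish: the values of a merge fold, in key order, are B's per-key merges.
lemma pvFinish (key : String) (S items : List (List (String × String)))
    (ord : List String)
    (hord : ord = PySem.Set.ofList (S.map (pvKeyOf key)))
    (hfil : ∀ k ∈ PySem.Set.ofList (S.map (pvKeyOf key)),
      items.filter (fun it => pvKeyOf key it = k) = S.filter (fun it => pvKeyOf key it = k)) :
    ((S.foldl (pvOStep key) PySem.Dict.empty).values).map PySem.Dict.items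
      = ord.map (fun k => pvMergeKey key k items) := by
  set M := S.foldl (pvOStep key) PySem.Dict.empty with hM
  have hnodup : M.keys.Nodup := by
    rw [hM]
    exact PySem.Dict.nodup_keys_foldl_insert_key S (pvKeyOf key)
      (fun m it => (m.getD (pvKeyOf key it) PySem.Dict.empty).update it) PySem.Dict.empty
      PySem.Dict.nodup_keys_empty
  have hkeys : M.keys = PySem.Set.ofList (S.map (pvKeyOf key)) := by
    rw [hM]; exact pvKeys_fold key S
  rw [PySem.Dict.values_eq_map_keys M hnodup PySem.Dict.empty, List.map_map, hord, ← hkeys]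
  apply List.map_congr_left
  intro k hk
  have hkS : k ∈ S.map (pvKeyOf key) := by
    rw [hkeys] at hk
    exact (PySem.Set.mem_ofList _ _).mp hk
  obtain ⟨it, hit, hkit⟩ := List.mem_map.mp hkS
  have hne : S.filter (fun it => pvKeyOf key it = k) ≠ [] := by
    intro hnil
    have : it ∈ S.filter (fun it => pvKeyOf key it = k) :=
      List.mem_filter.mpr ⟨hit, by simp [hkit]⟩
    rw [hnil] at this
    cases this
  show (M.getD k PySem.Dict.empty).items = pvMergeKey key k items
  rw [hM, pvGetD_fold key S k hne, pvMergeKey_eq, hfil k (hkeys ▸ hk)]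

-- ===== VERDICT (by name: the statement is the Claim_ definition above) =====
theorem merge_dict_lists_spec : Claim_equal_merge_dict_lists := by
  intro key l1 l2 append _ _
  unfold Spec_merge_dict_lists merge_dict_lists merge_dict_lists_alt
  show List.map PySem.Dict.items
      ((List.foldl (pvStepA2 key append) (List.foldl (pvStepA key) PySem.Dict.empty l1) (l1 ++ l2)).values)
    = (PySem.List.dedup ((if append then l1 ++ l2 else l1).map (pvKeyOf key))).map
        (fun k => pvMergeKey key k (l1 ++ l2))
  have h1 : l1.foldl (pvStepA key) PySem.Dict.empty = l1.foldl (pvOStep key) PySem.Dict.empty :=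
    PySem.List.foldl_congr_mem l1 _ _ _ (fun acc x _ => pvStepA_eq key acc x)
  rw [h1]
  cases append with
  | true =>
    have h2 : (l1 ++ l2).foldl (pvStepA2 key true) (l1.foldl (pvOStep key) PySem.Dict.empty)
        = (l1 ++ l2).foldl (pvOStep key) (l1.foldl (pvOStep key) PySem.Dict.empty) :=
      PySem.List.foldl_congr_mem _ _ _ _
        (fun acc x _ => by rw [pvStepA2_true_eq, pvStepA_eq])
    rw [h2, List.foldl_append, pvOuter_replay, ← List.foldl_append]
    exact pvFinish key (l1 ++ l2) (l1 ++ l2) _ (by simp) (fun k _ => rfl)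
  | false =>
    set l1k := PySem.Set.ofList (l1.map (pvKeyOf key)) with hl1k
    have hinv : ∀ s, (l1.foldl (pvOStep key) PySem.Dict.empty).contains s = l1k.contains s := by
      intro s
      rw [PySem.Dict.contains_eq_decide_mem_keys, pvKeys_fold, hl1k]
      simp
    rw [pvFold_stepA2_false key l1k (l1 ++ l2) _ hinv, List.filter_append]
    have hl1self : l1.filter (fun it => l1k.contains (pvKeyOf key it)) = l1 := by
      apply List.filter_eq_self.mpr
      intro it hit
      exact (PySem.Set.contains_iff _ _).mpr
        ((PySem.Set.mem_ofList _ _).mpr (List.mem_map_of_mem hit))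
    rw [hl1self, List.foldl_append, pvOuter_replay, ← List.foldl_append]
    have habsorb : PySem.Set.ofList
        ((l1 ++ (l2.filter (fun it => l1k.contains (pvKeyOf key it)))).map (pvKeyOf key))
        = PySem.Set.ofList (l1.map (pvKeyOf key)) := by
      rw [List.map_append]
      apply pvOfList_append_absorb
      intro y hy
      obtain ⟨it, hit, rfl⟩ := List.mem_map.mp hy
      have hp := (List.mem_filter.mp hit).2
      exact (PySem.Set.mem_ofList _ _).mp ((PySem.Set.contains_iff _ _).mp hp)
    apply pvFinish
    · rw [habsorb]
      simp
    · intro k hk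
      rw [habsorb] at hk
      have hck : k ∈ l1k := by rw [hl1k]; exact hk
      rw [List.filter_append, List.filter_append]
      congr 1
      rw [List.filter_filter]
      apply List.filter_congr
      intro it _
      by_cases hq : pvKeyOf key it = k
      · simp [hq, hck]

      · simp [hq]
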